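-- pv_equiv track=rewrite | github.com/jackyideal/AlphaTeam | AlphaFin/ai_team/routes.py | _format_search_links_for_reply
-- ===== SOURCE A (Python) =====
-- def _normalize_search_links(rows, limit=12):
--     out = []
--     seen = set()
--     max_n = max(1, int(limit or 12))
--     for row in (rows or []):
--         if not isinstance(row, dict):
--             continue
--         url = str(row.get('url') or row.get('link') or '').strip()
--         title = str(row.get('title') or '').strip()
--         source = str(row.get('source') or '').strip()
--         published_at = str(row.get('published_at') or '').strip()
--         summary = str(row.get('summary') or row.get('snippet') or '').strip()
--         if not url:
--             continue
--         key = (url.lower(), title)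
--         if key in seen:
--             continue
--         seen.add(key)
--         out.append({
--             'title': title,
--             'url': url,
--             'source': source,
--             'published_at': published_at,
--             'summary': summary,
--         })
--         if len(out) >= max_n:
--             break
--     return out
--
-- def _format_search_links_for_reply(rows, limit=8):
--     items = _normalize_search_links(rows or [], limit=limit)
--     if not items:
--         return ''
--     lines = ['### 联网搜索来源链接']
--     for idx, row in enumerate(items, 1):
--         title = str(row.get('title') or row.get('url') or '-').strip()
--         url = str(row.get('url') or '').strip()
--         source = str(row.get('source') or '-').strip() or '-'
--         published_at = str(row.get('published_at') or '-').strip() or '-'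
--         if url:
--             lines.append('%d. [%s](%s)（%s | %s）' % (idx, title, url, source, published_at))
--         else:
--             lines.append('%d. %s（%s | %s）' % (idx, title, source, published_at))
--     return '\n'.join(lines)
-- ===== SOURCE B (Python) =====
-- def _format_search_links_for_reply(rows, limit=8):
--     max_n = max(1, int(limit or 12))
--     seen = set()
--     lines = []
--     idx = 1
--     for row in (rows or []):
--         if idx > max_n:
--             break
--         if not isinstance(row, dict):
--             continue
--         url = str(row.get('url') or row.get('link') or '').strip()
--         if not url:
--             continue
--         title = str(row.get('title') or '').strip()
--         key = (url.lower(), title)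
--         if key in seen:
--             continue
--         seen.add(key)
--         source = str(row.get('source') or '').strip() or '-'
--         published_at = str(row.get('published_at') or '').strip() or '-'
--         lines.append('%d. [%s](%s)（%s | %s）' % (idx, title or url, url, source, published_at))
--         idx += 1
--     if not lines:
--         return ''
--     return '\n'.join(['### 联网搜索来源链接'] + lines)
-- ===== Notes on version B (the rewrite author's own statement) =====
-- stated objective: simpler
-- what changed: B replaces A's two-pass pipeline (normalize into an intermediate list of five-field dicts, then enumerate-and-format that list with a second round of fallbacks and re-stripping) with a single recursive pass that applies the dedup/url guards and emits each finished markdown line directly, carrying the line index and seen-set and never building the intermediate dict list.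
import Mathlib
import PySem

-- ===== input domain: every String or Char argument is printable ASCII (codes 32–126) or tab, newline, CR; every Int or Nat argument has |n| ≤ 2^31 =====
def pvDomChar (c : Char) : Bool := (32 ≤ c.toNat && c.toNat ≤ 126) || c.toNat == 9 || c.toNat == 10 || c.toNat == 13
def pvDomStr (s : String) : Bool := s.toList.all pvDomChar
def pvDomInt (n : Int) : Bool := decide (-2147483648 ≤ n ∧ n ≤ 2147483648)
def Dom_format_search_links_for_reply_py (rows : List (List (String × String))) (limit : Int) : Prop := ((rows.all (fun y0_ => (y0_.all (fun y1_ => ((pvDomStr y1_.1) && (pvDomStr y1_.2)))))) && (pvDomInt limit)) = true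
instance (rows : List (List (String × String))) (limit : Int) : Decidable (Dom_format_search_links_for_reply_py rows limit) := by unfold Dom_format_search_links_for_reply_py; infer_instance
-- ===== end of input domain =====

-- B fuses A's two passes (normalize to intermediate dicts, then format) into one recursive pass that
-- emits the markdown lines directly, with no intermediate list of dicts (objective: simpler decomposition).

-- shared Python-semantics helpers: dict.get (first match, per convention) and Python's `x or y` on strings
def pvGetS (row : List (String × String)) (k : String) : String :=
  ((row.find? (fun p => p.1 == k)).map (·.2)).getD ""
def pvOr (a b : String) : String := if a = "" then b else a
-- max(1, int(limit or 12))
def pvMaxN (limit : Int) : Int := max 1 (if limit = 0 then 12 else limit)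

-- ===== PORT A =====
-- loop of _normalize_search_links (recursion because of the `break`)
def pvNormLoop (max_n : Int) : List (List (String × String)) → PySem.Set (String × String) →
    List (List (String × String)) → List (List (String × String))
  | [], _, out => out
  | row :: rest, seen, out =>
    let url := PySem.Str.strip (pvOr (pvGetS row "url") (pvOr (pvGetS row "link") ""))
    let title := PySem.Str.strip (pvGetS row "title")
    let source := PySem.Str.strip (pvGetS row "source")
    let published_at := PySem.Str.strip (pvGetS row "published_at")
    let summary := PySem.Str.strip (pvOr (pvGetS row "summary") (pvOr (pvGetS row "snippet") ""))
    if url = "" then pvNormLoop max_n rest seen out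
    else
      let key := (PySem.Str.lower url, title)
      if PySem.Set.contains seen key then pvNormLoop max_n rest seen out
      else
        let out' := out ++ [[("title", title), ("url", url), ("source", source),
                             ("published_at", published_at), ("summary", summary)]]
        if max_n ≤ (out'.length : Int) then out'
        else pvNormLoop max_n rest (PySem.Set.add seen key) out'

def pvNormalize (rows : List (List (String × String))) (limit : Int) :
    List (List (String × String)) :=
  pvNormLoop (pvMaxN limit) rows PySem.Set.empty []

-- body of the formatting loop of _format_search_links_for_reply, for one row at index idx
def pvFmtOne (idx : Int) (row : List (String × String)) : String :=
  let title := PySem.Str.strip (pvOr (pvGetS row "title") (pvOr (pvGetS row "url") "-"))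
  let url := PySem.Str.strip (pvGetS row "url")
  let source := pvOr (PySem.Str.strip (pvOr (pvGetS row "source") "-")) "-"
  let published_at := pvOr (PySem.Str.strip (pvOr (pvGetS row "published_at") "-")) "-"
  if url ≠ "" then
    PySem.Int.toStr idx ++ ". [" ++ title ++ "](" ++ url ++ ")（" ++ source ++ " | " ++ published_at ++ "）"
  else
    PySem.Int.toStr idx ++ ". " ++ title ++ "（" ++ source ++ " | " ++ published_at ++ "）"

def pvFmtLoop (idx : Int) : List (List (String × String)) → List String
  | [] => []
  | row :: rest => pvFmtOne idx row :: pvFmtLoop (idx + 1) rest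

def format_search_links_for_reply_py (rows : List (List (String × String))) (limit : Int) : String :=
  let items := pvNormalize rows limit
  if items = [] then ""
  else PySem.Str.join "\n" ("### 联网搜索来源链接" :: pvFmtLoop 1 items)

-- ===== PORT B =====
-- the single fused loop of Source B, carrying (idx, seen, lines) and emitting finished lines directly
def pvGoB (max_n : Int) : List (List (String × String)) → Int → PySem.Set (String × String) → List String → List String
  | [], _, _, lines => lines
  | row :: rest, idx, seen, lines =>
    if max_n < idx then lines
    else
      let url := PySem.Str.strip (pvOr (pvGetS row "url") (pvOr (pvGetS row "link") ""))
      if url = "" then pvGoB max_n rest idx seen lines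
      else
        let title := PySem.Str.strip (pvGetS row "title")
        let key := (PySem.Str.lower url, title)
        if PySem.Set.contains seen key then pvGoB max_n rest idx seen lines
        else
          let source := pvOr (PySem.Str.strip (pvGetS row "source")) "-"
          let published_at := pvOr (PySem.Str.strip (pvGetS row "published_at")) "-"
          let line := PySem.Int.toStr idx ++ ". [" ++ pvOr title url ++ "](" ++ url ++ ")（" ++ source ++ " | " ++ published_at ++ "）"
          pvGoB max_n rest (idx + 1) (PySem.Set.add seen key) (lines ++ [line])

def format_search_links_for_reply_py_alt (rows : List (List (String × String))) (limit : Int) : String :=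
  let max_n := pvMaxN limit
  let lines := pvGoB max_n rows 1 PySem.Set.empty []
  if lines = [] then ""
  else PySem.Str.join "\n" ("### 联网搜索来源链接" :: lines)

-- ===== PRECONDITION & SPEC =====
def Spec_format_search_links_for_reply_py (rows : List (List (String × String))) (limit : Int) (out : String) : Prop := out = format_search_links_for_reply_py_alt rows limit
instance (rows : List (List (String × String))) (limit : Int) (out : String) : Decidable (Spec_format_search_links_for_reply_py rows limit out) := by unfold Spec_format_search_links_for_reply_py; infer_instance

-- ===== CLAIM (what is proved, stated in full; the proofs are below) =====
def Claim_equal_format_search_links_for_reply_py : Prop := ∀ (rows : List (List (String × String))) (limit : Int), Dom_format_search_links_for_reply_py rows limit → Spec_format_search_links_for_reply_py rows limit (format_search_links_for_reply_py rows limit)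

-- ===== LEMMAS AND PROOFS =====

-- strip is idempotent
theorem pv_dropWhile_dropWhile {α : Type} (p : α → Bool) (l : List α) :
    List.dropWhile p (List.dropWhile p l) = List.dropWhile p l := by
  induction l with
  | nil => rfl
  | cons a t ih =>
    by_cases h : p a
    · simp [h, ih]
    · simp [h]

theorem pv_head?_dropWhile {α : Type} (p : α → Bool) (l : List α) (a : α)
    (h : (List.dropWhile p l).head? = some a) : ¬ p a := by
  induction l with
  | nil => simp at h
  | cons b t ih =>
    by_cases hb : p b
    · rw [List.dropWhile_cons_of_pos hb] at h; exact ih h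
    · rw [List.dropWhile_cons_of_neg hb] at h
      simp at h; rw [← h]; exact hb

theorem pv_dropWhile_of_prefix {α : Type} (p : α → Bool) {s l : List α}
    (hp : s <+: List.dropWhile p l) : List.dropWhile p s = s := by
  cases s with
  | nil => rfl
  | cons a t =>
    have ha : (List.dropWhile p l).head? = some a := by
      obtain ⟨r, hr⟩ := hp; rw [← hr]; rfl
    rw [List.dropWhile_cons_of_neg (pv_head?_dropWhile p l a ha)]

theorem pv_chars_strip_idem (l : List Char) :
    PySem.Chars.strip (PySem.Chars.strip l) = PySem.Chars.strip l := by
  unfold PySem.Chars.strip PySem.Chars.rstrip PySem.Chars.lstrip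
  have hpre : (List.dropWhile PySem.Chars.isspace (List.dropWhile PySem.Chars.isspace l).reverse).reverse
      <+: List.dropWhile PySem.Chars.isspace l := by
    apply List.reverse_suffix.mp
    rw [List.reverse_reverse]
    exact List.dropWhile_suffix _
  rw [pv_dropWhile_of_prefix PySem.Chars.isspace hpre, List.reverse_reverse,
      pv_dropWhile_dropWhile]

theorem pv_strip_idem (s : String) :
    PySem.Str.strip (PySem.Str.strip s) = PySem.Str.strip s := by
  unfold PySem.Str.strip
  rw [String.toList_ofList, pv_chars_strip_idem]

-- formatting splits over append
theorem pvFmtLoop_append (i : Int) (xs ys : List (List (String × String))) :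
    pvFmtLoop i (xs ++ ys) = pvFmtLoop i xs ++ pvFmtLoop (i + xs.length) ys := by
  induction xs generalizing i with
  | nil => simp [pvFmtLoop]
  | cons a t ih =>
    have e : i + ((t.length : Int) + 1) = i + 1 + (t.length : Int) := by omega
    simp only [List.cons_append, pvFmtLoop, ih, List.length_cons]
    push_cast
    rw [e]

theorem pvGoB_stop (max_n : Int) (rs : List (List (String × String))) (idx : Int)
    (seen : PySem.Set (String × String)) (lines : List String) (h : max_n < idx) :
    pvGoB max_n rs idx seen lines = lines := by
  cases rs with
  | nil => rfl
  | cons r t => simp [pvGoB, h]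

-- A's formatting of one accepted (already stripped) item = B's line for it
theorem pvFmtOne_eq (idx : Int) (t u s p sm : String)
    (ht : PySem.Str.strip t = t) (hu : PySem.Str.strip u = u)
    (hs : PySem.Str.strip s = s) (hp : PySem.Str.strip p = p)
    (hune : u ≠ "") :
    pvFmtOne idx [("title", t), ("url", u), ("source", s), ("published_at", p), ("summary", sm)]
      = PySem.Int.toStr idx ++ ". [" ++ pvOr t u ++ "](" ++ u ++ ")（" ++
        pvOr s "-" ++ " | " ++ pvOr p "-" ++ "）" := by
  simp only [pvFmtOne, pvGetS, List.find?]
  norm_num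
  have hdash : PySem.Str.strip "-" = "-" := by decide
  by_cases h1 : t = ""
  · subst h1
    by_cases h2 : s = "" <;> by_cases h3 : p = "" <;>
      simp_all [pvOr]
  · by_cases h2 : s = "" <;> by_cases h3 : p = "" <;>
      simp_all [pvOr]

-- main invariant: fused pass = format-of-normalize, continued from accumulator `out`
theorem pv_main (max_n : Int) (rows : List (List (String × String))) :
    ∀ (seen : PySem.Set (String × String)) (out : List (List (String × String))),
    (out.length : Int) < max_n →
    pvFmtLoop 1 (pvNormLoop max_n rows seen out)
      = pvGoB max_n rows ((out.length : Int) + 1) seen (pvFmtLoop 1 out) := by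
  induction rows with
  | nil => intro seen out hout; simp [pvNormLoop, pvGoB]
  | cons row rest ih =>
    intro seen out hout
    have hidx : ¬ max_n < (out.length : Int) + 1 := by omega
    simp only [pvNormLoop, pvGoB, if_neg hidx]
    by_cases h1 : PySem.Str.strip (pvOr (pvGetS row "url") (pvOr (pvGetS row "link") "")) = ""
    · simp only [if_pos h1]
      exact ih seen out hout
    · simp only [if_neg h1]
      by_cases h2 : PySem.Set.contains seen
          (PySem.Str.lower (PySem.Str.strip (pvOr (pvGetS row "url") (pvOr (pvGetS row "link") ""))),
           PySem.Str.strip (pvGetS row "title")) = true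
      · simp only [h2, if_pos]
        exact ih seen out hout
      · simp only [h2, Bool.false_eq_true, if_false]
        -- the accepted item, exactly as A stores it
        have hline : pvFmtOne ((out.length : Int) + 1)
            [("title", PySem.Str.strip (pvGetS row "title")),
             ("url", PySem.Str.strip (pvOr (pvGetS row "url") (pvOr (pvGetS row "link") ""))),
             ("source", PySem.Str.strip (pvGetS row "source")),
             ("published_at", PySem.Str.strip (pvGetS row "published_at")),
             ("summary", PySem.Str.strip (pvOr (pvGetS row "summary") (pvOr (pvGetS row "snippet") "")))]
            = PySem.Int.toStr ((out.length : Int) + 1) ++ ". [" ++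
              pvOr (PySem.Str.strip (pvGetS row "title"))
                   (PySem.Str.strip (pvOr (pvGetS row "url") (pvOr (pvGetS row "link") ""))) ++ "](" ++
              PySem.Str.strip (pvOr (pvGetS row "url") (pvOr (pvGetS row "link") "")) ++ ")（" ++
              pvOr (PySem.Str.strip (pvGetS row "source")) "-" ++ " | " ++
              pvOr (PySem.Str.strip (pvGetS row "published_at")) "-" ++ "）" :=
        pvFmtOne_eq _ _ _ _ _ _ (pv_strip_idem _) (pv_strip_idem _) (pv_strip_idem _)
          (pv_strip_idem _) h1
        have hsplit := pvFmtLoop_append 1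
            (xs := out)
            (ys := [[("title", PySem.Str.strip (pvGetS row "title")),
               ("url", PySem.Str.strip (pvOr (pvGetS row "url") (pvOr (pvGetS row "link") ""))),
               ("source", PySem.Str.strip (pvGetS row "source")),
               ("published_at", PySem.Str.strip (pvGetS row "published_at")),
               ("summary", PySem.Str.strip (pvOr (pvGetS row "summary") (pvOr (pvGetS row "snippet") "")))]])
        by_cases h3 : max_n ≤ ((out.length + 1 : Nat) : Int)
        · have hlen : ¬ (1 : Int) + (out.length : Int) > max_n := by push_cast at h3 ⊢; omega
          have hstop : max_n < (out.length : Int) + 1 + 1 := by push_cast at h3; omega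
          simp only [List.length_append, List.length_cons, List.length_nil, Nat.zero_add, if_pos h3]
          rw [hsplit, pvGoB_stop max_n rest _ _ _ hstop]
          simp only [pvFmtLoop]
          have : (1 : Int) + (out.length : Int) = (out.length : Int) + 1 := by omega
          simp [this, hline]
        · have h3' : ∀ d : List (String × String), ((out ++ [d]).length : Int) < max_n := by
            intro d
            simp only [List.length_append, List.length_cons, List.length_nil]
            push_cast at h3 ⊢; omega
          simp only [List.length_append, List.length_cons, List.length_nil, Nat.zero_add, if_neg h3]
          rw [ih _ _ (h3' _), hsplit]
          simp only [pvFmtLoop, List.length_append, List.length_cons, List.length_nil]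
          have e1 : (1 : Int) + (out.length : Int) = (out.length : Int) + 1 := by omega
          simp [e1, hline]

-- ===== VERDICT (by name: the statement is the Claim_ definition above) =====
theorem format_search_links_for_reply_py_spec : Claim_equal_format_search_links_for_reply_py := by
  intro rows limit _
  unfold Spec_format_search_links_for_reply_py
  simp only [format_search_links_for_reply_py, format_search_links_for_reply_py_alt, pvNormalize,
    PySem.Set.empty]
  have hmax : (1 : Int) ≤ pvMaxN limit := le_max_left _ _
  have h := pv_main (pvMaxN limit) rows ([] : PySem.Set (String × String)) []
    (by simp; omega)
  simp only [List.length_nil, Int.ofNat_zero] at h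
  norm_num at h
  simp only [pvFmtLoop] at h
  cases hn : pvNormLoop (pvMaxN limit) rows ([] : PySem.Set (String × String)) [] with
  | nil =>
    rw [hn] at h
    simp only [pvFmtLoop] at h
    simp [← h]
  | cons a t =>
    rw [hn] at h
    have hne : pvGoB (pvMaxN limit) rows 1 ([] : PySem.Set (String × String)) [] ≠ [] := by
      rw [← h]; simp [pvFmtLoop]
    simp [hne, h]
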